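-- pv_equiv track=rewrite | github.com/poloxu/CSE280A_BFBSimulator | ControlBreaksSim.py | CountBFBSegments
-- ===== SOURCE A (Python) =====
-- def CountBFBSegments(input_str):
--     segments = set()
--     item = 0
--     while item < len(input_str):
--         segments.add(abs(input_str[item]))
--         item += 1
--     counts = [0]*(len(segments)+1)
--     for char in input_str:
--         counts[abs(char)] += 1
--     return counts
-- ===== SOURCE B (Python) =====
-- def CountBFBSegments(input_str):
--     vals = sorted(abs(x) for x in input_str)
--     runs = []
--     i = 0
--     while i < len(vals):
--         j = i
--         while j < len(vals) and vals[j] == vals[i]: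
--             j += 1
--         runs.append((vals[i], j - i))
--         i = j
--     result = [0] * (len(runs) + 1)
--     for v, c in runs:
--         result[v] = c
--     return result
-- ===== Notes on version B (the rewrite author's own statement) =====
-- stated objective: alternative
-- what changed: A tallies each element into a preallocated counts array after a set pass; B instead sorts the absolute values and scans the sorted list once, emitting (value, run-length) pairs for each maximal run of equal values, then writes each run length at its value's index; counting by sorting-and-grouping replaces counting by random-access increments. Pre_ excludes exactly the inputs where A raises IndexError (some absolute value exceeds the number of distinct absolute values); B raises there too.
import Mathlib
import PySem

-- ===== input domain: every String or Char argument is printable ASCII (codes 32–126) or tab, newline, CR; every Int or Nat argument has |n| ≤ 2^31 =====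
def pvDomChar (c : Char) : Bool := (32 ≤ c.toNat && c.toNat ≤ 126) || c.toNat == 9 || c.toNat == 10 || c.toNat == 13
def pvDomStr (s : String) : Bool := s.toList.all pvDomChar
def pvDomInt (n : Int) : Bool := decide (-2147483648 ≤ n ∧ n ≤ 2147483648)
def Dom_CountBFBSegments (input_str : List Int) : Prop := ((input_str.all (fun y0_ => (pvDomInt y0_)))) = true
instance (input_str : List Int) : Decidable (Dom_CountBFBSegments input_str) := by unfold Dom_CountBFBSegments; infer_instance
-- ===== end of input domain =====

-- B replaces A's tally-into-array counting by sort-then-group-runs: sort the absolute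
-- values, scan the sorted list emitting (value, run length) pairs, write each run length
-- at its value's index; objective: alternative (different algorithm, similar cost).

-- ===== PORT A =====
-- while item < len(input_str): segments.add(abs(input_str[item])); item += 1
-- then counts = [0]*(len(segments)+1); for char: counts[abs(char)] += 1
-- (the possible IndexError of counts[abs(char)] is modelled by Option; Pre_ excludes it)
def CountBFBSegments (input_str : List Int) : List Int :=
  let segments : PySem.Set Int :=
    (PySem.List.pyRange 0 (PySem.List.len input_str) 1).foldl
      (fun s item => PySem.Set.add s |PySem.List.pyGetD input_str item 0|) PySem.Set.empty
  let counts : List Int := List.replicate (segments.length + 1) 0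
  (input_str.foldl
    (fun acc char => acc.bind fun cs =>
      (PySem.List.pyGet? cs |char|).bind fun v => PySem.List.pySet? cs |char| (v + 1))
    (some counts)).getD []

-- ===== PORT B =====
-- the inner 'while j < len(vals) and vals[j] == vals[i]' / outer 'i = j' index loop,
-- as the obvious structural recursion on the remaining suffix of the sorted list:
-- the run at the front is the takeWhile, the loop resumes at the dropWhile
def pvRuns (l : List Int) : List (Int × Int) :=
  match l with
  | [] => []
  | x :: xs =>
      (x, 1 + ((xs.takeWhile (fun y => y == x)).length : Int)) ::
        pvRuns (xs.dropWhile (fun y => y == x))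
termination_by l.length
decreasing_by
  simp only [List.length_cons]
  exact Nat.lt_succ_of_le (List.dropWhile_sublist _).length_le

-- vals = sorted(abs(x) for x in input_str); runs as above;
-- result = [0]*(len(runs)+1); for v, c in runs: result[v] = c
-- (the possible IndexError of result[v] is modelled by Option; Pre_ excludes it)
def CountBFBSegments_alt (input_str : List Int) : List Int :=
  let vals : List Int := PySem.List.sorted (input_str.map (fun x => |x|)) (fun x => x) false
  let runs : List (Int × Int) := pvRuns vals
  let result : List Int := List.replicate (runs.length + 1) 0
  (runs.foldl
    (fun acc p => acc.bind fun rs => PySem.List.pySet? rs p.1 p.2)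
    (some result)).getD []

-- ===== PRECONDITION & SPEC =====
-- Pre_ excludes exactly the inputs on which A raises IndexError: some |x| exceeds the
-- number of distinct absolute values of the list, so counts[abs(x)] is out of range.
def Pre_CountBFBSegments (input_str : List Int) : Prop :=
  ∀ x ∈ input_str, |x| ≤ ((PySem.List.dedup (input_str.map (fun y => |y|))).length : Int)
instance (input_str : List Int) : Decidable (Pre_CountBFBSegments input_str) := by
  unfold Pre_CountBFBSegments; infer_instance
def pvWitness_CountBFBSegments : List Int := [1, -1, 2, 0]

def Spec_CountBFBSegments (input_str : List Int) (out : List Int) : Prop := out = CountBFBSegments_alt input_str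
instance (input_str : List Int) (out : List Int) : Decidable (Spec_CountBFBSegments input_str out) := by unfold Spec_CountBFBSegments; infer_instance

-- ===== CLAIM (what is proved, stated in full; the proofs are below) =====
def Claim_equal_CountBFBSegments : Prop := ∀ (input_str : List Int), Dom_CountBFBSegments input_str → Pre_CountBFBSegments input_str → Spec_CountBFBSegments input_str (CountBFBSegments input_str)

-- ===== LEMMAS AND PROOFS =====

-- A's counting loop, run from any state cs whose length covers every index |x|,
-- returns `some r` where r bumps each cs entry by the count of its index among the |x|.
theorem pv_loopA (l : List Int) : ∀ (cs : List Int),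
    (∀ x ∈ l, (|x|).toNat < cs.length) →
    ∃ r, l.foldl
        (fun acc char => acc.bind fun cs =>
          (PySem.List.pyGet? cs |char|).bind fun v => PySem.List.pySet? cs |char| (v + 1))
        (some cs) = some r ∧ r.length = cs.length ∧
      ∀ i : Nat, r.getD i 0 = cs.getD i 0 + ((l.map fun x => |x|).count (i : Int) : Int) := by
  induction l with
  | nil => intro cs _; exact ⟨cs, rfl, rfl, by simp⟩
  | cons x l ih =>
    intro cs h
    have hk : (|x|).toNat < cs.length := h x (List.mem_cons_self ..)
    have hx : |x| = ((|x|).toNat : Int) := (Int.toNat_of_nonneg (abs_nonneg x)).symm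
    set k := (|x|).toNat with hkdef
    have hget : PySem.List.pyGet? cs |x| = some cs[k] := by
      rw [hx, PySem.List.pyGet?_natCast, List.getElem?_eq_getElem hk]
    have hset : PySem.List.pySet? cs |x| (cs[k] + 1) = some (cs.set k (cs[k] + 1)) := by
      rw [hx]; exact PySem.List.pySet?_natCast cs k (cs[k] + 1) hk
    have hlen' : (cs.set k (cs[k] + 1)).length = cs.length := by simp
    obtain ⟨r, hr, hrl, hri⟩ := ih (cs.set k (cs[k] + 1))
      (fun y hy => by rw [hlen']; exact h y (List.mem_cons_of_mem _ hy))
    refine ⟨r, ?_, by rw [hrl, hlen'], ?_⟩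
    · simpa [List.foldl_cons, hget, hset] using hr
    · intro i
      rw [hri i]
      have hcs' : (cs.set k (cs[k] + 1)).getD i 0
          = if i = k then cs[k] + 1 else cs.getD i 0 := by
        rcases eq_or_ne i k with rfl | hne
        · simp [List.getD_eq_getElem?_getD, hk]
        · simp [List.getD_eq_getElem?_getD, hne, Ne.symm hne]
      have hc : (((x :: l).map fun x => |x|).count (i : Int) : Int)
          = (if i = k then 1 else 0) + ((l.map fun x => |x|).count (i : Int) : Int) := by
        have hiff : (|x| = (i : Int)) ↔ i = k := by
          rw [hx]; exact_mod_cast eq_comm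
        simp only [List.map_cons, List.count_cons, beq_iff_eq, hiff]
        split <;> push_cast <;> ring
      rw [hcs', hc]
      have hgd : cs.getD k 0 = cs[k] := by
        simp [List.getD_eq_getElem?_getD, List.getElem?_eq_getElem hk]
      split_ifs with hik
      · subst hik; rw [hgd]; ring
      · ring

-- B's write loop, run over distinct nonnegative in-range keys paired with counts in m,
-- writes each count at its key's index.
theorem pv_loopB (m : List Int) : ∀ (s : List Int) (cs : List Int),
    (∀ k ∈ s, 0 ≤ k ∧ k.toNat < cs.length) →
    ∃ r, ((s.map (fun k => (k, (List.count k m : Int)))).foldl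
        (fun acc p => acc.bind fun rs => PySem.List.pySet? rs p.1 p.2) (some cs)) = some r ∧
      r.length = cs.length ∧
      ∀ i : Nat, r.getD i 0
        = if (i : Int) ∈ s then (List.count (i : Int) m : Int) else cs.getD i 0 := by
  intro s
  induction s with
  | nil => intro cs _; exact ⟨cs, rfl, rfl, by simp⟩
  | cons k s' ih =>
    intro cs h
    obtain ⟨hk0, hkl⟩ := h k (List.mem_cons_self ..)
    have hkx : k = ((k.toNat : Nat) : Int) := (Int.toNat_of_nonneg hk0).symm
    have hset : PySem.List.pySet? cs k (List.count k m : Int)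
        = some (cs.set k.toNat (List.count k m : Int)) := by
      rw [hkx]; exact PySem.List.pySet?_natCast cs k.toNat _ hkl
    obtain ⟨r, hr, hrl, hri⟩ := ih (cs.set k.toNat (List.count k m : Int))
      (fun y hy => by simpa using h y (List.mem_cons_of_mem _ hy))
    refine ⟨r, ?_, by simpa using hrl, ?_⟩
    · simpa [hset] using hr
    · intro i
      rw [hri i]
      by_cases his : (i : Int) ∈ s'
      · simp [his, List.mem_cons]
      · have hcs' : (cs.set k.toNat (List.count k m : Int)).getD i 0
            = if (i : Int) = k then (List.count k m : Int) else cs.getD i 0 := by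
          rcases eq_or_ne (i : Int) k with hik | hne
          · have : i = k.toNat := by omega
            subst this
            simp [List.getD_eq_getElem?_getD, hkl, hik]
          · have hne' : i ≠ k.toNat := by omega
            simp [List.getD_eq_getElem?_getD, hne, Ne.symm hne']
        rw [if_neg his, hcs']
        rcases eq_or_ne (i : Int) k with hik | hne
        · rw [if_pos hik, if_pos (List.mem_cons.mpr (Or.inl hik)), hik]
        · rw [if_neg hne, if_neg (by simp [List.mem_cons, hne, his])]

-- the run decomposition of a nondecreasing list: pvRuns l lists each distinct value of l
-- once, paired with its multiplicity in l
theorem pv_runs_sorted : ∀ (l : List Int), l.Pairwise (· ≤ ·) →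
    ∃ ks : List Int, pvRuns l = ks.map (fun k => (k, (List.count k l : Int))) ∧
      ks.Nodup ∧ (∀ k, k ∈ ks ↔ k ∈ l) := by
  intro l
  induction l using pvRuns.induct with
  | case1 => intro _; exact ⟨[], by rw [pvRuns]; simp, List.nodup_nil, by simp⟩
  | case2 x xs ih =>
    intro hp
    set t := xs.takeWhile (fun y => y == x) with htdef
    set d := xs.dropWhile (fun y => y == x) with hddef
    have hxs : t ++ d = xs := List.takeWhile_append_dropWhile
    have ht : ∀ y ∈ t, y = x := by
      intro y hy
      have := List.mem_takeWhile_imp hy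
      simpa using this
    -- every element of d differs from x (sorted: they are strictly greater)
    have hd : ∀ y ∈ d, x < y := by
      have hptail : xs.Pairwise (· ≤ ·) := hp.of_cons
      have hpd0 : d.Pairwise (· ≤ ·) := hptail.sublist (List.dropWhile_sublist _)
      have hxle : ∀ y ∈ xs, x ≤ y := fun y hy => (List.pairwise_cons.mp hp).1 y hy
      intro y hy
      obtain ⟨z, d', hdd⟩ : ∃ z d', d = z :: d' := by
        cases hde : d with
        | nil => rw [hde] at hy; simp at hy
        | cons a b => exact ⟨a, b, rfl⟩
      have hz : ¬ (z == x) = true := by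
        have := List.head?_dropWhile_not (fun y => y == x) xs
        rw [← hddef, hdd] at this
        simpa using this
      have hzx : x < z := by
        have hzxs : z ∈ xs := (List.dropWhile_sublist _).mem (by rw [← hddef, hdd]; exact List.mem_cons_self ..)
        have := hxle z hzxs
        have hne : z ≠ x := by simpa using hz
        omega
      rw [hdd] at hy hpd0
      rcases List.mem_cons.mp hy with rfl | hy'
      · exact hzx
      · have : z ≤ y := (List.pairwise_cons.mp hpd0).1 y hy'
        omega
    have hpd : d.Pairwise (· ≤ ·) := (hp.of_cons).sublist (List.dropWhile_sublist _)
    obtain ⟨ks', hks', hnd', hmem'⟩ := ih hpd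
    refine ⟨x :: ks', ?_, ?_, ?_⟩
    · -- count x (x::xs) = 1 + t.length, and counts in d lift to counts in x::xs
      have hcx : (List.count x (x :: xs) : Int) = 1 + (t.length : Int) := by
        have h1 : List.count x t = t.length := List.count_eq_length.mpr (by
          intro y hy; exact ((ht y hy).symm) ▸ rfl)
        have h2 : List.count x d = 0 := List.count_eq_zero.mpr (by
          intro hc; have := hd x hc; omega)
        rw [List.count_cons_self, ← hxs, List.count_append, h1, h2]
        push_cast; ring
      have hcd : ∀ k ∈ ks', (List.count k d : Int) = (List.count k (x :: xs) : Int) := by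
        intro k hk
        have hkd : k ∈ d := (hmem' k).mp hk
        have hkx : k ≠ x := by have := hd k hkd; omega
        have h1 : List.count k t = 0 := List.count_eq_zero.mpr (by
          intro hc; exact hkx (ht k hc))
        have : List.count k (x :: xs) = List.count k d := by
          rw [← hxs]
          simp [List.count_append, h1, Ne.symm hkx]
        rw [this]
      rw [pvRuns]
      simp only [← htdef, ← hddef, hks', List.map_cons]
      refine congrArg₂ _ (by rw [hcx]) ?_
      exact (List.map_congr_left (fun k hk => by rw [hcd k hk])).symm
    · exact List.nodup_cons.mpr ⟨fun hc => by
        have := hd x ((hmem' x).mp hc); omega, hnd'⟩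
    · intro k
      constructor
      · intro hk
        rcases List.mem_cons.mp hk with rfl | hk'
        · exact List.mem_cons_self ..
        · exact List.mem_cons_of_mem _ (by
            rw [← hxs]; exact List.mem_append_right _ ((hmem' k).mp hk'))
      · intro hk
        rcases List.mem_cons.mp hk with rfl | hk'
        · exact List.mem_cons_self ..
        · rw [← hxs] at hk'
          rcases List.mem_append.mp hk' with hkt | hkd
          · rw [ht k hkt]; exact List.mem_cons_self ..
          · exact List.mem_cons_of_mem _ ((hmem' k).mpr hkd)

theorem pv_main (input_str : List Int) (hpre : Pre_CountBFBSegments input_str) :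
    CountBFBSegments input_str = CountBFBSegments_alt input_str := by
  set m : List Int := input_str.map (fun x => |x|) with hmdef
  set n : Nat := (PySem.Set.ofList m).length with hndef
  -- A's while loop builds the set of absolute values
  have hseg : (PySem.List.pyRange 0 (PySem.List.len input_str) 1).foldl
      (fun s item => PySem.Set.add s |PySem.List.pyGetD input_str item 0|) PySem.Set.empty
      = PySem.Set.ofList m := by
    rw [PySem.List.foldl_pyRange_zero_pyGetD input_str 0 (fun s v => PySem.Set.add s |v|)
      PySem.Set.empty]
    rw [PySem.Set.ofList_eq_foldl, hmdef, List.foldl_map]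
    rfl
  -- B's sorted list of absolute values and its run decomposition
  set sm : List Int := PySem.List.sorted m (fun x => x) false with hsmdef
  have hsp : sm.Pairwise (· ≤ ·) := by
    have := PySem.List.sorted_pairwise m (fun x => x) 
    simpa using this
  have hperm : sm.Perm m := PySem.List.sorted_perm m (fun x => x) false
  obtain ⟨ks, hks, hnd, hmem⟩ := pv_runs_sorted sm hsp
  -- counts in sm equal counts in m; membership in ks equals membership in m
  have hcnt : ∀ k, List.count k sm = List.count k m := fun k => hperm.count_eq k
  have hmemm : ∀ k, k ∈ ks ↔ k ∈ m := fun k => (hmem k).trans hperm.mem_iff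
  have hruns : pvRuns sm = ks.map (fun k => (k, (List.count k m : Int))) := by
    rw [hks]
    exact List.map_congr_left (fun k _ => by rw [hcnt k])
  -- ks is a permutation of the distinct values, so len(runs) = n
  have hkperm : ks.Perm (PySem.Set.ofList m) := by
    rw [List.perm_ext_iff_of_nodup hnd (PySem.Set.nodup_ofList m)]
    intro a
    rw [hmemm a, PySem.Set.mem_ofList]
  have hkn : ks.length = n := by rw [hkperm.length_eq, hndef]
  -- Pre_ puts every index |x| inside counts
  have hb : ∀ x ∈ input_str, (|x|).toNat < (List.replicate (n + 1) (0 : Int)).length := by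
    intro x hx
    have := hpre x hx
    rw [PySem.List.dedup_eq_ofList, ← hmdef, ← hndef] at this
    simp only [List.length_replicate]
    omega
  obtain ⟨r, hr, hrl, hri⟩ := pv_loopA input_str (List.replicate (n + 1) 0) hb
  have hA : CountBFBSegments input_str = r := by
    unfold CountBFBSegments
    simp only [hseg, ← hndef]
    rw [hr]
    rfl
  -- B's write loop, over the run pairs
  have hk : ∀ k ∈ ks, 0 ≤ k ∧ k.toNat < (List.replicate (n + 1) (0 : Int)).length := by
    intro k hks'
    have hkm : k ∈ m := (hmemm k).mp hks'
    obtain ⟨x, hx, hxk⟩ := List.mem_map.mp (hmdef ▸ hkm)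
    have h1 := hpre x hx
    rw [PySem.List.dedup_eq_ofList, ← hmdef, ← hndef, hxk] at h1
    constructor
    · rw [← hxk]; exact abs_nonneg x
    · simp only [List.length_replicate]; omega
  obtain ⟨rB, hrB, hrBl, hrBi⟩ := pv_loopB m ks (List.replicate (n + 1) 0) hk
  have hB : CountBFBSegments_alt input_str = rB := by
    unfold CountBFBSegments_alt
    simp only [← hmdef, ← hsmdef, hruns, List.length_map, hkn]
    rw [hrB]
    rfl
  rw [hA, hB]
  apply List.ext_getElem?
  intro i
  rcases lt_or_ge i (n + 1) with hi | hi
  · have hil : i < r.length := by rw [hrl]; simp; omega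
    have hiB : i < rB.length := by rw [hrBl]; simp; omega
    rw [List.getElem?_eq_getElem hil, List.getElem?_eq_getElem hiB]
    have hgd : r[i] = r.getD i 0 := by rw [List.getD_eq_getElem r 0 hil]
    have hgdB : rB[i] = rB.getD i 0 := by rw [List.getD_eq_getElem rB 0 hiB]
    have hrep : (List.replicate (n + 1) (0 : Int)).getD i 0 = 0 := by
      simp [List.getD_eq_getElem?_getD]
    rw [hgd, hgdB, hri i, hrBi i, hrep]
    by_cases hmemi : (i : Int) ∈ ks
    · rw [if_pos hmemi, hmdef]; simp
    · have hnm : (i : Int) ∉ m := fun hc => hmemi ((hmemm _).mpr hc)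
      have hz : List.count ((i : Int)) (List.map (fun x => |x|) input_str) = 0 :=
        List.count_eq_zero.mpr (by rw [← hmdef]; exact hnm)
      rw [if_neg hmemi, hz]
      simp
  · rw [List.getElem?_eq_none (by rw [hrl]; simp; omega),
      List.getElem?_eq_none (by rw [hrBl]; simp; omega)]

-- ===== VERDICT (by name: the statement is the Claim_ definition above) =====
theorem CountBFBSegments_spec : Claim_equal_CountBFBSegments := by
  intro input_str _ hpre
  exact pv_main input_str hpre
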